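-- pv_equiv track=rewrite | github.com/igivankov-cloud/zondeditor | src/zondeditor/io/excel_import_detect.py | _has_repeating_signature
-- ===== SOURCE A (Python) =====
-- ROLE_IGNORE = "ignore"
--
-- ROLE_DEPTH = "depth"
--
-- def _has_repeating_signature(roles: list[str]) -> bool:
--     seq = [r for r in roles if r not in (ROLE_IGNORE, ROLE_DEPTH)]
--     n = len(seq)
--     if n < 4:
--         return False
--     for width in range(2, min(6, n // 2 + 1)):
--         chunk = seq[:width]
--         if len(chunk) < 2:
--             continue
--         repeats = 1
--         pos = width
--         while pos + width <= n and seq[pos : pos + width] == chunk: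
--             repeats += 1
--             pos += width
--         if repeats >= 2:
--             return True
--     return False
-- ===== SOURCE B (Python) =====
-- def _has_repeating_signature(roles: list[str]) -> bool:
--     seq = [r for r in roles if r not in ("ignore", "depth")]
--     n = len(seq)
--     return any(2 * width <= n and seq[:width] == seq[width:2 * width]
--                for width in range(2, 6))
-- ===== Notes on version B (the rewrite author's own statement) =====
-- stated objective: simpler
-- what changed: B drops A's nested width/while repeat-counting loops and dead len(chunk)<2 guard: since repeats>=2 only needs the first while-iteration to succeed, B just checks for each width in 2..5 whether the first two width-blocks of the filtered sequence are equal (any() over one comparison per width); the n<4 early return falls out of 2*width<=n.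
import Mathlib
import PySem

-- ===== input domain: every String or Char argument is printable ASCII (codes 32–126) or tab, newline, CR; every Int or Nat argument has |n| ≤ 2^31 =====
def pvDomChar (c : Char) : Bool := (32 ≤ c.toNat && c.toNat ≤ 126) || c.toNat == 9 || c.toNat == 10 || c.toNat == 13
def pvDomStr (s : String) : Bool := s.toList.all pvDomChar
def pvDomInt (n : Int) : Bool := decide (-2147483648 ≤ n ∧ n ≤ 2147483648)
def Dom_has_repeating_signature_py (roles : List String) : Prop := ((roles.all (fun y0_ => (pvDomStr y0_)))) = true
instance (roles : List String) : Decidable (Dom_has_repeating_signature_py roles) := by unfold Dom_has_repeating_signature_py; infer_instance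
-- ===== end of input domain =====

-- B replaces A's nested width/while counting loops by a single pass: for width in 2..5 it
-- checks directly whether the first two width-blocks of the filtered sequence are equal (simpler).

-- ===== PORT A =====
-- the inner 'while pos + width <= n and seq[pos:pos+width] == chunk' loop; fuel = len(seq)
-- is always enough since each iteration advances pos by width ≥ 2 and needs pos + width ≤ n
def pvWhileA (seq chunk : List String) (width n : Int) : Nat → Int → Int → Int
  | 0, _, repeats => repeats
  | fuel + 1, pos, repeats =>
    if pos + width ≤ n ∧ PySem.List.slice seq (some pos) (some (pos + width)) = chunk then
      pvWhileA seq chunk width n fuel (pos + width) (repeats + 1)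
    else repeats

-- the 'for width in range(…)' loop with its early return
def pvForA (seq : List String) (n : Int) : List Int → Bool
  | [] => false
  | width :: ws =>
    let chunk := PySem.List.slice seq none (some width)
    if chunk.length < 2 then pvForA seq n ws
    else if 2 ≤ pvWhileA seq chunk width n seq.length width 1 then true
    else pvForA seq n ws

def has_repeating_signature_py (roles : List String) : Bool :=
  let seq := roles.filter (fun r => !(r == "ignore" || r == "depth"))
  let n : Int := seq.length
  if n < 4 then false
  else pvForA seq n (PySem.List.pyRange 2 (min 6 (PySem.Int.floordiv n 2 + 1)) 1)

-- ===== PORT B =====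
def has_repeating_signature_py_alt (roles : List String) : Bool :=
  let seq := roles.filter (fun r => !(r == "ignore" || r == "depth"))
  let n : Int := seq.length
  (PySem.List.pyRange 2 6 1).any (fun width =>
    decide (2 * width ≤ n) &&
      (PySem.List.slice seq none (some width) ==
        PySem.List.slice seq (some width) (some (2 * width))))

-- ===== PRECONDITION & SPEC =====
def Spec_has_repeating_signature_py (roles : List String) (out : Bool) : Prop := out = has_repeating_signature_py_alt roles
instance (roles : List String) (out : Bool) : Decidable (Spec_has_repeating_signature_py roles out) := by unfold Spec_has_repeating_signature_py; infer_instance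

-- ===== CLAIM (what is proved, stated in full; the proofs are below) =====
def Claim_equal_has_repeating_signature_py : Prop := ∀ (roles : List String), Dom_has_repeating_signature_py roles → Spec_has_repeating_signature_py roles (has_repeating_signature_py roles)

-- ===== LEMMAS AND PROOFS =====

theorem pvWhileA_le (seq chunk : List String) (width n : Int) :
    ∀ (fuel : Nat) (pos repeats : Int), repeats ≤ pvWhileA seq chunk width n fuel pos repeats := by
  intro fuel
  induction fuel with
  | zero => intro pos r; simp [pvWhileA]
  | succ k ih =>
    intro pos r
    by_cases h : pos + width ≤ n ∧ PySem.List.slice seq (some pos) (some (pos + width)) = chunk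
    · simp only [pvWhileA, if_pos h]
      have := ih (pos + width) (r + 1)
      omega
    · simp [pvWhileA, h]

theorem pvWhileA_start (seq chunk : List String) (width n : Int) (fuel : Nat) (hf : fuel ≠ 0) :
    (2 ≤ pvWhileA seq chunk width n fuel width 1) ↔
      (width + width ≤ n ∧ PySem.List.slice seq (some width) (some (width + width)) = chunk) := by
  cases fuel with
  | zero => exact absurd rfl hf
  | succ k =>
    by_cases h : width + width ≤ n ∧ PySem.List.slice seq (some width) (some (width + width)) = chunk
    · simp only [pvWhileA, if_pos h]
      have hle := pvWhileA_le seq chunk width n k (width + width) (1 + 1)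
      constructor
      · intro _; exact h
      · intro _; omega
    · simp only [pvWhileA, if_neg h]
      constructor
      · intro h2; omega
      · intro hc; exact absurd hc h

theorem pvForA_eq_any (seq : List String) (hL : 4 ≤ (seq.length : Int)) :
    ∀ ws : List Int, (∀ w ∈ ws, 2 ≤ w) →
      pvForA seq (seq.length : Int) ws =
        ws.any (fun width =>
          decide (2 * width ≤ (seq.length : Int)) &&
            (PySem.List.slice seq none (some width) ==
              PySem.List.slice seq (some width) (some (2 * width)))) := by
  intro ws
  induction ws with
  | nil => intro _; simp [pvForA]
  | cons w ws ih =>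
    intro hall
    have hw : 2 ≤ w := hall w (by simp)
    have hchunk : ¬ (PySem.List.slice seq none (some w)).length < 2 := by
      rw [PySem.List.slice_to seq (show (0:Int) ≤ w by omega)]
      simp only [List.length_take]
      omega
    have hrec := ih (fun x hx => hall x (by simp [hx]))
    have hiff := pvWhileA_start seq (PySem.List.slice seq none (some w)) w (seq.length : Int)
      seq.length (by omega)
    have h2 : 2 * w = w + w := by ring
    by_cases h : w + w ≤ (seq.length : Int) ∧
        PySem.List.slice seq (some w) (some (w + w)) = PySem.List.slice seq none (some w)
    · have hhead : (decide (2 * w ≤ (seq.length : Int)) &&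
          (PySem.List.slice seq none (some w) ==
            PySem.List.slice seq (some w) (some (2 * w)))) = true := by
        rw [h2]
        simp [h.1, h.2.symm]
      simp only [pvForA, if_neg hchunk, if_pos (hiff.mpr h), List.any_cons, hhead, Bool.true_or]
    · have hhead : (decide (2 * w ≤ (seq.length : Int)) &&
          (PySem.List.slice seq none (some w) ==
            PySem.List.slice seq (some w) (some (2 * w)))) = false := by
        rw [h2]
        by_cases ha : w + w ≤ (seq.length : Int)
        · have hne : ¬ PySem.List.slice seq none (some w) =
              PySem.List.slice seq (some w) (some (w + w)) := fun hc => h ⟨ha, hc.symm⟩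
          simp [ha, hne]
        · simp [ha]
      simp only [pvForA, if_neg hchunk, List.any_cons, hhead, Bool.false_or]
      rw [if_neg (fun hc => h (hiff.mp hc))]
      exact hrec

theorem pv_main (seq : List String) :
    (if (seq.length : Int) < 4 then false
     else pvForA seq (seq.length : Int)
       (PySem.List.pyRange 2 (min 6 (PySem.Int.floordiv (seq.length : Int) 2 + 1)) 1)) =
    (PySem.List.pyRange 2 6 1).any (fun width =>
      decide (2 * width ≤ (seq.length : Int)) &&
        (PySem.List.slice seq none (some width) ==
          PySem.List.slice seq (some width) (some (2 * width)))) := by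
  by_cases hlt : (seq.length : Int) < 4
  · rw [if_pos hlt]
    symm
    rw [List.any_eq_false]
    intro w hw
    have hmem := PySem.List.mem_pyRange_one.mp hw
    have hno : ¬ (2 * w ≤ (seq.length : Int)) := by omega
    simp [hno]
  · rw [if_neg hlt]
    have hL : 4 ≤ (seq.length : Int) := by omega
    have hdiv : PySem.Int.floordiv (seq.length : Int) 2 = (seq.length : Int) / 2 :=
      PySem.Int.floordiv_eq_ediv_of_pos (by omega)
    have hm2 : 2 ≤ min 6 (PySem.Int.floordiv (seq.length : Int) 2 + 1) := by rw [hdiv]; omega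
    have hm6 : min 6 (PySem.Int.floordiv (seq.length : Int) 2 + 1) ≤ 6 := by rw [hdiv]; omega
    rw [pvForA_eq_any seq hL _ (fun w hw => (PySem.List.mem_pyRange_one.mp hw).1),
        PySem.List.pyRange_one_append 2 _ 6 hm2 hm6, List.any_append]
    have htail : (PySem.List.pyRange (min 6 (PySem.Int.floordiv (seq.length : Int) 2 + 1)) 6 1).any
        (fun width =>
          decide (2 * width ≤ (seq.length : Int)) &&
            (PySem.List.slice seq none (some width) ==
              PySem.List.slice seq (some width) (some (2 * width)))) = false := by
      rw [List.any_eq_false]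
      intro w hw
      have hmem := PySem.List.mem_pyRange_one.mp hw
      rw [hdiv] at hmem
      have hgt : ¬ (2 * w ≤ (seq.length : Int)) := by omega
      simp [hgt]
    rw [htail, Bool.or_false]

-- ===== VERDICT (by name: the statement is the Claim_ definition above) =====
theorem has_repeating_signature_py_spec : Claim_equal_has_repeating_signature_py := by
  intro roles _
  show has_repeating_signature_py roles = has_repeating_signature_py_alt roles
  exact pv_main (roles.filter (fun r => !(r == "ignore" || r == "depth")))
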